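-- pv_equiv track=rewrite | github.com/joshcwainwright/GeorgiaTechCoursework | CS1301/HW03.py | tennisMatch
-- ===== SOURCE A (Python) =====
-- def tennisMatch(p1,p2,record):
--     p2point=0
--     p1point=0
--     p2game=0
--     p1game=0
--     for ch in record:
--         if ch in '1':
--             p1point+=1
--             continue
--         elif ch in '2':
--             p2point+=1
--             continue
--         else:
--             if p1point>p2point:
--                 p1game+=1
--                 p1point=0
--                 p2point=0
--             elif p1point<p2point:
--                 p2game+=1
--                 p1point=0
--                 p2point=0
--             else:
--                 p1point=0
--                 p2point=0
--                 continue
--     if p1game>p2game: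
--         sent="{} won! The score was {}-{}.".format(p1,p1game,p2game)
--         return(sent)
--     elif p2game>p1game:
--         sent="{} won! The score was {}-{}.".format(p2,p2game,p1game)
--         return(sent)
--     else:
--         return("It's a tie!")
-- ===== SOURCE B (Python) =====
-- def tennisMatch(p1, p2, record):
--     # Split the record into game segments on every non-point character,
--     # then tally each completed segment by comparing its counts of '1' and '2'.
--     marks = ''.join(ch if ch in '12' else ' ' for ch in record)
--     g1 = 0
--     g2 = 0
--     for seg in marks.split(' ')[:-1]:
--         c1 = seg.count('1')
--         c2 = seg.count('2')
--         if c1 > c2: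
--             g1 += 1
--         elif c2 > c1:
--             g2 += 1
--     if g1 > g2:
--         return "{} won! The score was {}-{}.".format(p1, g1, g2)
--     elif g2 > g1:
--         return "{} won! The score was {}-{}.".format(p2, g2, g1)
--     else:
--         return "It's a tie!"
-- ===== Notes on version B (the rewrite author's own statement) =====
-- stated objective: alternative
-- what changed: Replaces A's running per-character point/game state machine with a split-on-separator pass: the record is split into game segments, each completed segment is tallied by comparing its counts of '1' and '2'.
import Mathlib
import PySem

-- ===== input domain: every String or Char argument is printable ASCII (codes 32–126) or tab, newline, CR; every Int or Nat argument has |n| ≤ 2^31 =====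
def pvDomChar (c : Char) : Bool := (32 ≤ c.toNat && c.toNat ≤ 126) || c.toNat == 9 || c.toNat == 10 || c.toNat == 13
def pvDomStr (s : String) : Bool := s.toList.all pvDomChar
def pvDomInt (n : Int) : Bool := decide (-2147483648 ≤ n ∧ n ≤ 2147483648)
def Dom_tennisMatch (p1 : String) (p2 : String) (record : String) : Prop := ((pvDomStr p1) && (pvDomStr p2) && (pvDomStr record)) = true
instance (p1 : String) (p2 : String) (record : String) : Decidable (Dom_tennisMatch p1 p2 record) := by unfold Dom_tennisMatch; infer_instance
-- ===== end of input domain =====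

-- B replaces A's running per-character point/game state machine with a split-into-segments
-- pass that tallies each completed segment by comparing its counts of '1' and '2' (alternative decomposition).

-- ===== PORT A =====
def tennisMatch (p1 : String) (p2 : String) (record : String) : String :=
  let s := record.toList.foldl (fun (st : Int × Int × Int × Int) ch =>
    if ch == '1' then (st.1 + 1, st.2.1, st.2.2.1, st.2.2.2)
    else if ch == '2' then (st.1, st.2.1 + 1, st.2.2.1, st.2.2.2)
    else if st.1 > st.2.1 then (0, 0, st.2.2.1 + 1, st.2.2.2)
    else if st.1 < st.2.1 then (0, 0, st.2.2.1, st.2.2.2 + 1)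
    else (0, 0, st.2.2.1, st.2.2.2)) (0, 0, 0, 0)
  if s.2.2.1 > s.2.2.2 then
    p1 ++ " won! The score was " ++ PySem.Int.toStr s.2.2.1 ++ "-" ++ PySem.Int.toStr s.2.2.2 ++ "."
  else if s.2.2.2 > s.2.2.1 then
    p2 ++ " won! The score was " ++ PySem.Int.toStr s.2.2.2 ++ "-" ++ PySem.Int.toStr s.2.2.1 ++ "."
  else "It's a tie!"

-- ===== PORT B =====
def tennisMatch_alt (p1 : String) (p2 : String) (record : String) : String :=
  let marks := record.toList.map (fun c => if c == '1' || c == '2' then c else ' ')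
  let segs := (PySem.Chars.splitOn marks [' ']).dropLast   -- marks.split(' ')[:-1]
  let g := segs.foldl (fun (g : Int × Int) seg =>
      let c1 : Int := PySem.Chars.count seg ['1']
      let c2 : Int := PySem.Chars.count seg ['2']
      if c1 > c2 then (g.1 + 1, g.2) else if c2 > c1 then (g.1, g.2 + 1) else g) (0, 0)
  if g.1 > g.2 then
    p1 ++ " won! The score was " ++ PySem.Int.toStr g.1 ++ "-" ++ PySem.Int.toStr g.2 ++ "."
  else if g.2 > g.1 then
    p2 ++ " won! The score was " ++ PySem.Int.toStr g.2 ++ "-" ++ PySem.Int.toStr g.1 ++ "."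
  else "It's a tie!"

-- ===== PRECONDITION & SPEC =====
def Spec_tennisMatch (p1 : String) (p2 : String) (record : String) (out : String) : Prop := out = tennisMatch_alt p1 p2 record
instance (p1 : String) (p2 : String) (record : String) (out : String) : Decidable (Spec_tennisMatch p1 p2 record out) := by unfold Spec_tennisMatch; infer_instance

-- ===== CLAIM (what is proved, stated in full; the proofs are below) =====
def Claim_equal_tennisMatch : Prop := ∀ (p1 : String) (p2 : String) (record : String), Dom_tennisMatch p1 p2 record → Spec_tennisMatch p1 p2 record (tennisMatch p1 p2 record)

-- ===== LEMMAS AND PROOFS =====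

-- games added when the pair of point counts (a, b) is resolved
def pvResolve (a b : Int) : Int × Int :=
  if a > b then (1, 0) else if b > a then (0, 1) else (0, 0)

-- common spec: games produced by the rest of the record given current point counts (a, b)
def pvG : List Char → Int → Int → Int × Int
  | [], _, _ => (0, 0)
  | c :: cs, a, b =>
    if c = '1' then pvG cs (a + 1) b
    else if c = '2' then pvG cs a (b + 1)
    else ((pvResolve a b).1 + (pvG cs 0 0).1, (pvResolve a b).2 + (pvG cs 0 0).2)

-- structural splitter: split on '=sep' keeping empty pieces (what splitOn computes for a singleton sep)
def pvSplit (sep : Char) : List Char → List (List Char)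
  | [] => [[]]
  | c :: cs => if c = sep then [] :: pvSplit sep cs else (pvSplit sep cs).modifyHead (c :: ·)

theorem pvSplit_ne_nil (sep : Char) (cs : List Char) : pvSplit sep cs ≠ [] := by
  induction cs with
  | nil => simp [pvSplit]
  | cons c cs ih =>
    simp only [pvSplit]
    split_ifs
    · simp
    · cases h : pvSplit sep cs with
      | nil => exact absurd h ih
      | cons x xs => simp [List.modifyHead]

-- splitOn.go with a singleton separator, enough fuel
theorem splitOn_go_eq (sep : Char) (fuel : Nat) :
    ∀ (l cur : List Char) (acc : List (List Char)), l.length < fuel →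
      PySem.Chars.splitOn.go [sep] fuel l cur acc
        = acc.reverse ++ (pvSplit sep l).modifyHead (cur.reverse ++ ·) := by
  induction fuel with
  | zero => intro l cur acc h; omega
  | succ f ih =>
    intro l cur acc h
    cases l with
    | nil =>
      simp [PySem.Chars.splitOn.go, pvSplit, List.modifyHead]
    | cons c rest =>
      by_cases hc : c = sep
      · subst hc
        have hp : ([c].isPrefixOf (c :: rest)) = true := by simp [List.isPrefixOf]
        have hlt : rest.length < f := by simp at h; omega
        simp only [PySem.Chars.splitOn.go, hp, if_true]
        rw [show List.drop [c].length (c :: rest) = rest from by simp]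
        rw [ih rest [] (cur.reverse :: acc) hlt]
        simp only [pvSplit, if_pos]
        cases pvSplit c rest <;> simp [List.modifyHead]

      · have hp : ([sep].isPrefixOf (c :: rest)) = false := by
          simp [List.isPrefixOf]; exact fun hh => absurd hh.symm hc
        have hlt : rest.length < f := by simp at h; omega
        simp only [PySem.Chars.splitOn.go, hp, Bool.false_eq_true, if_false]
        rw [ih rest (c :: cur) acc hlt]
        obtain ⟨hd, tl, hsp⟩ : ∃ hd tl, pvSplit sep rest = hd :: tl := by
          cases hs : pvSplit sep rest with
          | nil => exact absurd hs (pvSplit_ne_nil sep rest)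
          | cons x xs => exact ⟨x, xs, rfl⟩
        simp [pvSplit, hc, hsp, List.modifyHead]

theorem splitOn_singleton (sep : Char) (cs : List Char) :
    PySem.Chars.splitOn cs [sep] = pvSplit sep cs := by
  simp only [PySem.Chars.splitOn]
  rw [splitOn_go_eq sep (cs.length + 1) cs [] [] (by omega)]
  cases h : pvSplit sep cs <;> simp [List.modifyHead]

-- count with a singleton pattern is List.count
theorem count_go_singleton (v : Char) (fuel : Nat) :
    ∀ (l : List Char) (acc : Nat), l.length ≤ fuel →
      PySem.Chars.count.go [v] fuel l acc = acc + l.count v := by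
  induction fuel with
  | zero =>
    intro l acc h
    cases l with
    | nil => simp [PySem.Chars.count.go]
    | cons c rest => simp at h
  | succ f ih =>
    intro l acc h
    cases l with
    | nil => simp [PySem.Chars.count.go]
    | cons c rest =>
      by_cases hc : c = v
      · subst hc
        have hp : ([c].isPrefixOf (c :: rest)) = true := by simp [List.isPrefixOf]
        have hle : rest.length ≤ f := by simp at h; omega
        simp only [PySem.Chars.count.go, hp, if_true, List.drop_one, List.tail_cons,
          List.length_singleton]
        rw [ih rest (acc + 1) hle]
        simp
        omega
      · have hp : ([v].isPrefixOf (c :: rest)) = false := by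
          simp [List.isPrefixOf]; exact fun hh => absurd hh.symm hc
        have hle : rest.length ≤ f := by simp at h; omega
        simp only [PySem.Chars.count.go, hp, Bool.false_eq_true, if_false]
        rw [ih rest acc hle]
        simp [hc]

theorem count_singleton (v : Char) (cs : List Char) :
    PySem.Chars.count cs [v] = cs.count v := by
  have := count_go_singleton v cs.length cs 0 (le_refl _)
  simpa [PySem.Chars.count] using this

def pvMark (c : Char) : Char := if c == '1' || c == '2' then c else ' '

def pvStepA (st : Int × Int × Int × Int) (ch : Char) : Int × Int × Int × Int :=
  if ch == '1' then (st.1 + 1, st.2.1, st.2.2.1, st.2.2.2)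
  else if ch == '2' then (st.1, st.2.1 + 1, st.2.2.1, st.2.2.2)
  else if st.1 > st.2.1 then (0, 0, st.2.2.1 + 1, st.2.2.2)
  else if st.1 < st.2.1 then (0, 0, st.2.2.1, st.2.2.2 + 1)
  else (0, 0, st.2.2.1, st.2.2.2)

-- A's loop: the final game pair is the starting games plus pvG of the rest
theorem foldA_games : ∀ (cs : List Char) (a b g1 g2 : Int),
    ((cs.foldl pvStepA (a, b, g1, g2)).2.2)
    = (g1 + (pvG cs a b).1, g2 + (pvG cs a b).2) := by
  intro cs
  induction cs with
  | nil => intro a b g1 g2; simp [pvG]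
  | cons c cs ih =>
    intro a b g1 g2
    rw [List.foldl_cons]
    by_cases h1 : c = '1'
    · have hstep : pvStepA (a, b, g1, g2) c = (a + 1, b, g1, g2) := by simp [pvStepA, h1]
      rw [hstep, ih (a + 1) b g1 g2]
      simp [pvG, h1]
    · by_cases h2 : c = '2'
      · have hstep : pvStepA (a, b, g1, g2) c = (a, b + 1, g1, g2) := by
          simp [pvStepA, h2]
        rw [hstep, ih a (b + 1) g1 g2]
        simp [pvG, h2]
      · simp only [pvG, if_neg h1, if_neg h2]
        by_cases hab : a > b
        · have hstep : pvStepA (a, b, g1, g2) c = (0, 0, g1 + 1, g2) := by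
            simp [pvStepA, h1, h2, hab]
          rw [hstep, ih 0 0 (g1 + 1) g2]
          simp [pvResolve, hab]
          ring
        · by_cases hba : a < b
          · have hstep : pvStepA (a, b, g1, g2) c = (0, 0, g1, g2 + 1) := by
              simp [pvStepA, h1, h2, hab, hba]
            rw [hstep, ih 0 0 g1 (g2 + 1)]
            simp [pvResolve, hab, hba]
            ring
          · have hstep : pvStepA (a, b, g1, g2) c = (0, 0, g1, g2) := by
              simp [pvStepA, h1, h2, hab, hba]
            rw [hstep, ih 0 0 g1 g2]
            simp [pvResolve, hab, hba]

-- completed-segment tally with the first segment's counts boosted by (a, b)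
def pvF2 : List (List Char) → Int → Int → Int × Int
  | [], _, _ => (0, 0)
  | [_], _, _ => (0, 0)
  | s :: s' :: rest, a, b =>
    ((pvResolve (a + (s.count '1' : Int)) (b + (s.count '2' : Int))).1 + (pvF2 (s' :: rest) 0 0).1,
     (pvResolve (a + (s.count '1' : Int)) (b + (s.count '2' : Int))).2 + (pvF2 (s' :: rest) 0 0).2)

theorem pvF2_cons_one (h : List Char) (t : List (List Char)) (a b : Int) :
    pvF2 (('1' :: h) :: t) a b = pvF2 (h :: t) (a + 1) b := by
  cases t with
  | nil => simp [pvF2]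
  | cons s' rest =>
    have c1 : ('1' :: h).count '1' = h.count '1' + 1 := by simp
    have c2 : ('1' :: h).count '2' = h.count '2' := by simp
    simp only [pvF2, c1, c2]
    rw [show (a + ((h.count '1' + 1 : Nat) : Int)) = (a + 1 + (h.count '1' : Int)) from by
      push_cast; ring]

theorem pvF2_cons_two (h : List Char) (t : List (List Char)) (a b : Int) :
    pvF2 (('2' :: h) :: t) a b = pvF2 (h :: t) a (b + 1) := by
  cases t with
  | nil => simp [pvF2]
  | cons s' rest =>
    have c1 : ('2' :: h).count '1' = h.count '1' := by simp
    have c2 : ('2' :: h).count '2' = h.count '2' + 1 := by simp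
    simp only [pvF2, c1, c2]
    rw [show (b + ((h.count '2' + 1 : Nat) : Int)) = (b + 1 + (h.count '2' : Int)) from by
      push_cast; ring]

theorem pvG_eq_pvF2 : ∀ (cs : List Char) (a b : Int),
    pvG cs a b = pvF2 (pvSplit ' ' (cs.map pvMark)) a b := by
  intro cs
  induction cs with
  | nil => intro a b; simp [pvSplit, pvF2, pvG]
  | cons c cs ih =>
    intro a b
    obtain ⟨hd, tl, hsp⟩ : ∃ hd tl, pvSplit ' ' (cs.map pvMark) = hd :: tl := by
      cases hs : pvSplit ' ' (cs.map pvMark) with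
      | nil => exact absurd hs (pvSplit_ne_nil _ _)
      | cons x xs => exact ⟨x, xs, rfl⟩
    by_cases h1 : c = '1'
    · subst h1
      rw [show List.map pvMark ('1' :: cs) = '1' :: List.map pvMark cs from by simp [pvMark]]
      rw [show pvSplit ' ' ('1' :: List.map pvMark cs)
            = (pvSplit ' ' (List.map pvMark cs)).modifyHead ('1' :: ·) from by simp [pvSplit]]
      rw [hsp, List.modifyHead, pvF2_cons_one]
      rw [show pvG ('1' :: cs) a b = pvG cs (a + 1) b from by simp [pvG]]
      rw [ih (a + 1) b, hsp]
    · by_cases h2 : c = '2'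
      · subst h2
        rw [show List.map pvMark ('2' :: cs) = '2' :: List.map pvMark cs from by simp [pvMark]]
        rw [show pvSplit ' ' ('2' :: List.map pvMark cs)
              = (pvSplit ' ' (List.map pvMark cs)).modifyHead ('2' :: ·) from by simp [pvSplit]]
        rw [hsp, List.modifyHead, pvF2_cons_two]
        rw [show pvG ('2' :: cs) a b = pvG cs a (b + 1) from by simp [pvG]]
        rw [ih a (b + 1), hsp]
      · have hm : pvMark c = ' ' := by
          simp only [pvMark]
          have : (c == '1' || c == '2') = false := by simp [h1, h2]
          rw [this]; rfl
        rw [show List.map pvMark (c :: cs) = ' ' :: List.map pvMark cs from by simp [hm]]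
        rw [show pvSplit ' ' (' ' :: List.map pvMark cs)
              = [] :: pvSplit ' ' (List.map pvMark cs) from by simp [pvSplit]]
        rw [hsp]
        rw [show pvG (c :: cs) a b
              = ((pvResolve a b).1 + (pvG cs 0 0).1, (pvResolve a b).2 + (pvG cs 0 0).2) from by
            simp [pvG, h1, h2]]
        rw [show pvF2 ([] :: hd :: tl) a b
              = ((pvResolve a b).1 + (pvF2 (hd :: tl) 0 0).1,
                 (pvResolve a b).2 + (pvF2 (hd :: tl) 0 0).2) from by simp [pvF2]]
        rw [ih 0 0, hsp]

def pvStepB (g : Int × Int) (seg : List Char) : Int × Int :=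
  let c1 : Int := PySem.Chars.count seg ['1']
  let c2 : Int := PySem.Chars.count seg ['2']
  if c1 > c2 then (g.1 + 1, g.2) else if c2 > c1 then (g.1, g.2 + 1) else g

-- B's fold over the completed segments
theorem foldB_games : ∀ (segs : List (List Char)) (g : Int × Int),
    (segs.dropLast.foldl pvStepB g)
    = (g.1 + (pvF2 segs 0 0).1, g.2 + (pvF2 segs 0 0).2) := by
  intro segs
  induction segs with
  | nil => intro g; simp [pvF2]
  | cons s rest ih =>
    intro g
    cases rest with
    | nil => simp [pvF2]
    | cons s' r =>
      rw [List.dropLast_cons₂, List.foldl_cons, ih]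
      simp only [pvStepB, count_singleton, pvF2, zero_add]
      split_ifs with hgt hlt
      · simp only [pvResolve, if_pos hgt, Prod.mk.injEq]
        constructor <;> ring
      · simp only [pvResolve, if_neg hgt, if_pos hlt, Prod.mk.injEq]
        constructor <;> ring
      · simp only [pvResolve, if_neg hgt, if_neg hlt, Prod.mk.injEq]
        constructor <;> ring

-- ===== VERDICT (by name: the statement is the Claim_ definition above) =====
theorem tennisMatch_spec : Claim_equal_tennisMatch := by
  intro p1 p2 record _
  unfold Spec_tennisMatch tennisMatch tennisMatch_alt
  dsimp only
  rw [show (fun (c : Char) => if c == '1' || c == '2' then c else ' ') = pvMark from rfl]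
  rw [show (fun (st : Int × Int × Int × Int) ch =>
      if ch == '1' then (st.1 + 1, st.2.1, st.2.2.1, st.2.2.2)
      else if ch == '2' then (st.1, st.2.1 + 1, st.2.2.1, st.2.2.2)
      else if st.1 > st.2.1 then (0, 0, st.2.2.1 + 1, st.2.2.2)
      else if st.1 < st.2.1 then (0, 0, st.2.2.1, st.2.2.2 + 1)
      else (0, 0, st.2.2.1, st.2.2.2)) = pvStepA from rfl]
  rw [show (fun (g : Int × Int) seg =>
      let c1 : Int := PySem.Chars.count seg ['1']
      let c2 : Int := PySem.Chars.count seg ['2']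
      if c1 > c2 then (g.1 + 1, g.2) else if c2 > c1 then (g.1, g.2 + 1) else g)
      = pvStepB from rfl]
  rw [splitOn_singleton, foldA_games, foldB_games, ← pvG_eq_pvF2]
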